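-- pv_equiv track=rewrite | github.com/PixelML/agenticflow-cli | src/agenticflow_cli/client.py | _extract_path_parameter_names
-- ===== SOURCE A (Python) =====
-- def _extract_path_parameter_names(path: str) -> list[str]:
--     names: list[str] = []
--     in_braces = False
--     start = 0
--     for index, char in enumerate(path):
--         if char == "{":
--             in_braces = True
--             start = index + 1
--         elif char == "}" and in_braces:
--             names.append(path[start:index])
--             in_braces = False
--     return names
-- ===== SOURCE B (Python) =====
-- def _extract_path_parameter_names(path: str) -> list[str]:
--     # Split on "{": each later piece is the text after a "{"; a name is captured
--     # exactly when a "}" occurs in that piece, and it is the text before the first "}".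
--     return [seg.split("}", 1)[0] for seg in path.split("{")[1:] if "}" in seg]
-- ===== Notes on version B (the rewrite author's own statement) =====
-- stated objective: idiomatic
-- what changed: Replaced the index-tracking per-character state machine with a split-on-opening-brace comprehension that keeps, for each piece containing a closing brace, its text before the first one.
import Mathlib
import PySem

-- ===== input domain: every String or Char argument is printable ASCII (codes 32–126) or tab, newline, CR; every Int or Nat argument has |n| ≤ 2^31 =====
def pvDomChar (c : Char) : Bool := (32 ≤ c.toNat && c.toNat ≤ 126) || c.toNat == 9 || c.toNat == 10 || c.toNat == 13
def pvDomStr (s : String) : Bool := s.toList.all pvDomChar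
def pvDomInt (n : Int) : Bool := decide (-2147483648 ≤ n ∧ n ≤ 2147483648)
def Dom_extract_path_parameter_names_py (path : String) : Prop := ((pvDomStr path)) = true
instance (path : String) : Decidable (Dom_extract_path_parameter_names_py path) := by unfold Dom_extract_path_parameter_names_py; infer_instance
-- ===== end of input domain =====

-- B replaces A's character-by-character state machine by a split-on-'{' comprehension (idiomatic; same cost).

-- ===== PORT A =====
-- one loop step of A: state = (names, in_braces, start)
def pvAStep (path : String) (st : List String × Bool × Int) (ic : Int × Char) : List String × Bool × Int :=
  if ic.2 = '{' then (st.1, true, ic.1 + 1)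
  else if ic.2 = '}' && st.2.1 then
    (st.1 ++ [PySem.Str.slice path (some st.2.2) (some ic.1)], false, st.2.2)
  else st

def extract_path_parameter_names_py (path : String) : List String :=
  ((PySem.List.enumerate path.toList).foldl (pvAStep path) ([], false, 0)).1

-- ===== PORT B =====
-- seg.split("}", 1)[0] for a seg containing '}' is its prefix before the first '}' (exact),
-- i.e. takeWhile (c != '}'); path.split("{") is List.splitOn '{' on the characters (exact
-- for a one-character separator); [1:] is List.drop 1; the comprehension's filter + map is a filterMap.
def pvNotRB (c : Char) : Bool := !(c == '}')

def pvBKeep (seg : List Char) : Option String :=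
  if seg.contains '}' then some (String.ofList (seg.takeWhile pvNotRB)) else none

def extract_path_parameter_names_py_alt (path : String) : List String :=
  ((path.toList.splitOn '{').drop 1).filterMap pvBKeep

-- ===== PRECONDITION & SPEC =====
def Spec_extract_path_parameter_names_py (path : String) (out : List String) : Prop := out = extract_path_parameter_names_py_alt path
instance (path : String) (out : List String) : Decidable (Spec_extract_path_parameter_names_py path out) := by unfold Spec_extract_path_parameter_names_py; infer_instance

-- ===== CLAIM (what is proved, stated in full; the proofs are below) =====
def Claim_equal_extract_path_parameter_names_py : Prop := ∀ (path : String), Dom_extract_path_parameter_names_py path → Spec_extract_path_parameter_names_py path (extract_path_parameter_names_py path)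

-- ===== LEMMAS AND PROOFS =====

-- chars-level capture of one segment, and B's whole result on a char list
def pvKeepC (seg : List Char) : Option (List Char) :=
  if seg.contains '}' then some (seg.takeWhile pvNotRB) else none

def pvG (cs : List Char) : List (List Char) :=
  ((cs.splitOn '{').drop 1).filterMap pvKeepC

theorem pvB_eq (path : String) :
    extract_path_parameter_names_py_alt path = (pvG path.toList).map String.ofList := by
  simp only [extract_path_parameter_names_py_alt, pvG, List.map_filterMap]
  congr 1
  funext seg
  simp only [pvBKeep, pvKeepC]
  split_ifs <;> simp

theorem pvTakeWhile_no (b : List Char) (h : '}' ∉ b) (t : List Char) :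
    (b ++ '}' :: t).takeWhile pvNotRB = b := by
  induction b with
  | nil => simp [pvNotRB]
  | cons x xs ih =>
    simp only [List.mem_cons, not_or] at h
    have hx : pvNotRB x = true := by simp [pvNotRB]; exact fun e => h.1 e.symm
    simp [hx, ih h.2]

theorem pvKeepC_none (b : List Char) (h : '}' ∉ b) : pvKeepC b = none := by
  simp [pvKeepC, List.contains_eq_mem, h]

theorem pvKeepC_capture (b : List Char) (h : '}' ∉ b) (t : List Char) :
    pvKeepC (b ++ '}' :: t) = some b := by
  simp [pvKeepC, pvTakeWhile_no b h t]

theorem pvSplit_cons (c : Char) (t : List Char) :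
    (c :: t).splitOn '{' =
      if c = '{' then [] :: t.splitOn '{'
      else ((c :: (t.splitOn '{').headI) :: (t.splitOn '{').drop 1) := by
  have hne := List.splitOnP_ne_nil (fun a => a == '{') t
  by_cases hc : c = '{'
  · simp [List.splitOn, List.splitOnP_cons, hc]
  · obtain ⟨h0, tl, h⟩ := List.exists_cons_of_ne_nil hne
    simp [List.splitOn, List.splitOnP_cons, hc, h, List.modifyHead]

theorem pvG_cons_not (c : Char) (t : List Char) (hc : c ≠ '{') :
    pvG (c :: t) = pvG t := by
  simp [pvG, pvSplit_cons, hc]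

theorem pvG_cons_brace (t : List Char) :
    pvG ('{' :: t) = (pvKeepC (t.splitOn '{').headI).toList ++ pvG t := by
  have hne : t.splitOn '{' ≠ [] := by
    simpa [List.splitOn] using List.splitOnP_ne_nil (fun a => a == '{') t
  simp only [pvG, pvSplit_cons, if_pos rfl]
  obtain ⟨h0, tl, h⟩ := List.exists_cons_of_ne_nil hne
  rw [h]
  simp only [List.headI_cons, List.drop_one, List.tail_cons]
  rcases hk : pvKeepC h0 with _ | v <;> simp [hk]

theorem pvHeadI_cons_not (c : Char) (t : List Char) (hc : c ≠ '{') :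
    ((c :: t).splitOn '{').headI = c :: (t.splitOn '{').headI := by
  simp [pvSplit_cons, hc]

theorem pvHeadI_cons_brace (t : List Char) : (('{' :: t).splitOn '{').headI = [] := by
  simp [pvSplit_cons]

theorem pvSlice_eq (path : String) (a b : Nat) :
    PySem.Str.slice path (some (a : Int)) (some (b : Int))
      = String.ofList ((path.toList.drop a).take (b - a)) := by
  have h : (PySem.Str.slice path (some (a : Int)) (some (b : Int))).toList
      = (path.toList.drop a).take (b - a) := by
    simp [PySem.Str.toList_slice, PySem.List.slice_natCast]
  rw [← String.ofList_toList (s := PySem.Str.slice path (some (a : Int)) (some (b : Int))), h]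

-- A-side loop invariant.  rest = what is left of the string at index k.
-- closed state: result = names ++ (pvG rest).map ofList (for any start);
-- open state with collected segment prefix b (no '}' in it, ending at index k):
--   result = names ++ (capture from b ++ first piece of rest, then pvG rest).map ofList
theorem pvA_loop (path : String) :
    ∀ (rest : List Char) (k : Nat), path.toList.drop k = rest →
      (∀ (names : List String) (start : Int),
        ((PySem.List.enumerate rest k).foldl (pvAStep path) (names, false, start)).1
          = names ++ (pvG rest).map String.ofList) ∧
      (∀ (names : List String) (st : Nat) (b : List Char),
        path.toList.drop st = b ++ rest → st + b.length = k → '}' ∉ b →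
        ((PySem.List.enumerate rest k).foldl (pvAStep path) (names, true, (st : Int))).1
          = names ++ (((pvKeepC (b ++ (rest.splitOn '{').headI)).toList ++ pvG rest).map String.ofList)) := by
  intro rest
  induction rest with
  | nil =>
    intro k hk
    constructor
    · intro names start
      simp [PySem.List.enumerate, pvG, List.splitOn, List.splitOnP_nil]
    · intro names st b hb hlen hnb
      simp [PySem.List.enumerate, pvG, List.splitOn, List.splitOnP_nil,
        pvKeepC_none b hnb]
  | cons c t ih =>
    intro k hk
    have hkt : path.toList.drop (k + 1) = t := by
      rw [← List.drop_drop, hk]; simp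
    have ihk := ih (k + 1) hkt
    have henum : PySem.List.enumerate (c :: t) (k : Int)
        = ((k : Int), c) :: PySem.List.enumerate t ((k : Int) + 1) := rfl
    have hcast : ((k : Int) + 1) = ((k + 1 : Nat) : Int) := by push_cast; ring
    constructor
    · intro names start
      rw [henum, List.foldl_cons]
      by_cases hc : c = '{'
      · subst hc
        have hstep : pvAStep path (names, false, start) ((k : Int), '{')
            = (names, true, (k : Int) + 1) := by simp [pvAStep]
        rw [hstep, hcast]
        have := ihk.2 names (k + 1) []
          (by simpa using hkt) (by simp) (by simp)
        rw [this, pvG_cons_brace]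
        simp
      · have hstep : pvAStep path (names, false, start) ((k : Int), c) = (names, false, start) := by
          simp [pvAStep, hc]
        rw [hstep, hcast, ihk.1 names start, pvG_cons_not c t hc]
    · intro names st b hb hlen hnb
      rw [henum, List.foldl_cons]
      by_cases hc : c = '{'
      · subst hc
        have hstep : pvAStep path (names, true, (st : Int)) ((k : Int), '{')
            = (names, true, (k : Int) + 1) := by simp [pvAStep]
        rw [hstep, hcast]
        have := ihk.2 names (k + 1) []
          (by simpa using hkt) (by simp) (by simp)
        rw [this, pvG_cons_brace, pvHeadI_cons_brace, List.append_nil,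
          pvKeepC_none b hnb]
        simp
      · by_cases hr : c = '}'
        · subst hr
          have hstep : pvAStep path (names, true, (st : Int)) ((k : Int), '}')
              = (names ++ [PySem.Str.slice path (some (st : Int)) (some (k : Int))], false, (st : Int)) := by
            simp [pvAStep]
          rw [hstep, hcast, ihk.1 _ _]
          have hbval : (path.toList.drop st).take (k - st) = b := by
            rw [hb, ← hlen]
            simpa using List.take_left (l₁ := b) (l₂ := '}' :: t)
          rw [pvSlice_eq, hbval, pvG_cons_not _ t (by decide),
            pvHeadI_cons_not _ t (by decide), pvKeepC_capture b hnb]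
          simp
        · have hstep : pvAStep path (names, true, (st : Int)) ((k : Int), c)
              = (names, true, (st : Int)) := by
            simp [pvAStep, hc, hr]
          have hb' : path.toList.drop st = (b ++ [c]) ++ t := by
            rw [hb]; simp
          have hnb' : '}' ∉ b ++ [c] := by
            simp [hnb]; exact fun e => hr e.symm
          have hlen' : st + (b ++ [c]).length = k + 1 := by
            simp; omega
          rw [hstep, hcast, ihk.2 names st (b ++ [c]) hb' hlen' hnb',
            pvG_cons_not c t hc, pvHeadI_cons_not c t hc]
          simp

theorem pvA_eq (path : String) :
    extract_path_parameter_names_py path = (pvG path.toList).map String.ofList := by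
  have h := (pvA_loop path path.toList 0 (by simp)).1 [] 0
  simpa [extract_path_parameter_names_py] using h

-- ===== VERDICT (by name: the statement is the Claim_ definition above) =====
theorem extract_path_parameter_names_py_spec : Claim_equal_extract_path_parameter_names_py := by
  intro path _
  unfold Spec_extract_path_parameter_names_py
  rw [pvA_eq, pvB_eq]
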